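-- pv_equiv track=rewrite | github.com/youweiliang/norm_robustness | lip/partition_kernel.py | equivalence_class
-- ===== SOURCE A (Python) =====
-- def equivalence_class(x, y, r, s):
--     all_idx = []
--     for i in range(x, r[0]):
--         for j in range(y, r[1]):
--             all_idx.append((i,j))
--
--     classes = []
--     while len(all_idx) > 0:
--         x0, y0 = all_idx[0]
--         tmp = []
--         for x in range(x0, r[0], s[0]):
--             for y in range(y0, r[1], s[1]):
--                 tmp.append((x, y))
--                 all_idx.remove((x, y))
--         classes.append(tmp)
--
--     return classes
-- ===== SOURCE B (Python) =====
-- def equivalence_class(x, y, r, s):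
--     if not (x < r[0] and y < r[1]):
--         return []
--     s0, s1 = s[0], s[1]
--     classes = []
--     for a in range(x, min(r[0], x + s0)):
--         for b in range(y, min(r[1], y + s1)):
--             classes.append([(i, j) for i in range(a, r[0], s0)
--                                    for j in range(b, r[1], s1)])
--     return classes
-- ===== Notes on version B (the rewrite author's own statement) =====
-- stated objective: alternative
-- what changed: A repeatedly takes the first remaining grid pair and deletes its whole stepped class from the worklist with list.remove; B never builds or mutates a worklist: it enumerates the class representatives (a,b) with x<=a<min(r[0],x+s[0]), y<=b<min(r[1],y+s[1]) directly and emits each class as a range comprehension.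
import Mathlib
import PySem

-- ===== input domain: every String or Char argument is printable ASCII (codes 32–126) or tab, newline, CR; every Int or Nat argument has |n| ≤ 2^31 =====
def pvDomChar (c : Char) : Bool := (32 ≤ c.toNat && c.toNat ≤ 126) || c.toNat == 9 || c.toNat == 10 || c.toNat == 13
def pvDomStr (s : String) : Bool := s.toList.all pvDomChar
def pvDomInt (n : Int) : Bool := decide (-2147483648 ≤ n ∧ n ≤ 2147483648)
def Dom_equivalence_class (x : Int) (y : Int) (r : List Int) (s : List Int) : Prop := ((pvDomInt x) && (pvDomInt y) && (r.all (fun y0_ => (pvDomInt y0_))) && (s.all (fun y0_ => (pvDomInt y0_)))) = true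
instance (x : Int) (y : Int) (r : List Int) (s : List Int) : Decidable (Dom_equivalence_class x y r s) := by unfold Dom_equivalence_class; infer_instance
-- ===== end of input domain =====

-- B replaces A's remove-from-the-worklist sweep by direct enumeration of the class
-- representatives (a,b) with x ≤ a < min(r0, x+s0), y ≤ b < min(r1, y+s1); objective:
-- alternative (no worklist and no list.remove scans; measured speed comparable).

-- ===== PORT A =====
-- the two nested 'for' loops building all_idx
def pvGrid (x y r0 r1 : Int) : List (Int × Int) :=
  (PySem.List.pyRange x r0 1).foldl (fun acc i =>
    (PySem.List.pyRange y r1 1).foldl (fun acc2 j => acc2 ++ [(i, j)]) acc) []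

-- the body of one 'while' iteration: the nested stepped loops appending to tmp and removing
-- from all_idx; 'none' = the ValueError Python's list.remove raises (excluded by Pre_)
def pvInner (r0 r1 s0 s1 x0 y0 : Int) (all_idx : List (Int × Int)) :
    Option (List (Int × Int) × List (Int × Int)) :=
  (PySem.List.pyRange x0 r0 s0).foldl (fun st xv =>
    (PySem.List.pyRange y0 r1 s1).foldl (fun st2 yv =>
      match st2 with
      | none => none
      | some (tmp, ali) =>
        match PySem.List.remove? ali (xv, yv) with
        | none => none
        | some ali' => some (tmp ++ [(xv, yv)], ali')) st) (some ([], all_idx))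

-- the 'while len(all_idx) > 0' loop; fuel = the initial length of all_idx bounds the number of
-- iterations (under Pre_ every iteration strictly shortens all_idx, so the fuel never runs out)
def pvLoop (r0 r1 s0 s1 : Int) : Nat → List (Int × Int) → List (List (Int × Int)) → List (List (Int × Int))
  | 0, _, classes => classes
  | fuel+1, all_idx, classes =>
    match all_idx with
    | [] => classes
    | (x0, y0) :: _ =>
      match pvInner r0 r1 s0 s1 x0 y0 all_idx with
      | none => classes
      | some (tmp, rest) => pvLoop r0 r1 s0 s1 fuel rest (classes ++ [tmp])

def equivalence_class (x : Int) (y : Int) (r : List Int) (s : List Int) : List (List (Int × Int)) :=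
  match PySem.List.pyGet? r 0 with
  | none => []                     -- IndexError at r[0] (excluded by Pre_)
  | some r0 =>
    if x < r0 then
      match PySem.List.pyGet? r 1 with
      | none => []                 -- IndexError at r[1] (excluded by Pre_)
      | some r1 =>
        let all_idx := pvGrid x y r0 r1
        match PySem.List.pyGet? s 0, PySem.List.pyGet? s 1 with
        | some s0, some s1 => pvLoop r0 r1 s0 s1 all_idx.length all_idx []
        | _, _ => []               -- s too short: Python raises iff all_idx ≠ [] (excluded); else []
    else []                        -- range(x, r[0]) empty: r[1], s never read; result []

-- ===== PORT B =====
-- one equivalence class: the comprehension [(i,j) for i in range(a,r0,s0) for j in range(b,r1,s1)]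
def pvClass (r0 r1 s0 s1 a b : Int) : List (Int × Int) :=
  (PySem.List.pyRange a r0 s0).flatMap (fun i =>
    (PySem.List.pyRange b r1 s1).map (fun j => (i, j)))

def equivalence_class_alt (x : Int) (y : Int) (r : List Int) (s : List Int) : List (List (Int × Int)) :=
  (PySem.List.pyGet? r 0).elim [] (fun r0 =>      -- none = IndexError at r[0] (excluded by Pre_)
    if x < r0 then
      (PySem.List.pyGet? r 1).elim [] (fun r1 =>  -- none = IndexError at r[1] (excluded by Pre_)
        if y < r1 then
          (PySem.List.pyGet? s 0).elim [] (fun s0 =>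
            (PySem.List.pyGet? s 1).elim [] (fun s1 =>
              (PySem.List.pyRange x (min r0 (x + s0)) 1).foldl (fun cls a =>
                (PySem.List.pyRange y (min r1 (y + s1)) 1).foldl (fun cls2 b =>
                  cls2 ++ [pvClass r0 r1 s0 s1 a b]) cls) []))
        else []                    -- early return []
      )
    else [])                       -- early return [] (r[1] not read, as in A)

-- ===== PRECONDITION & SPEC =====
-- Pre_ excludes exactly the inputs where A does not return: r[0] missing; r[1] missing while
-- range(x,r[0]) is nonempty; and, when the grid is nonempty, s[0]/s[1] missing (IndexError),
-- a zero step (ValueError from range/list.remove) or a negative step (the while loop never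
-- empties all_idx and A diverges).
def Pre_equivalence_class (x : Int) (y : Int) (r : List Int) (s : List Int) : Prop :=
  1 ≤ r.length ∧
  (x < PySem.List.pyGetD r 0 0 →
    2 ≤ r.length ∧
    (y < PySem.List.pyGetD r 1 0 →
      2 ≤ s.length ∧ 1 ≤ PySem.List.pyGetD s 0 0 ∧ 1 ≤ PySem.List.pyGetD s 1 0))
instance (x : Int) (y : Int) (r : List Int) (s : List Int) : Decidable (Pre_equivalence_class x y r s) := by unfold Pre_equivalence_class; infer_instance

def pvWitness_equivalence_class : Int × Int × List Int × List Int := (0, 0, [3, 3], [2, 2])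

def Spec_equivalence_class (x : Int) (y : Int) (r : List Int) (s : List Int) (out : List (List (Int × Int))) : Prop := out = equivalence_class_alt x y r s
instance (x : Int) (y : Int) (r : List Int) (s : List Int) (out : List (List (Int × Int))) : Decidable (Spec_equivalence_class x y r s out) := by unfold Spec_equivalence_class; infer_instance

-- ===== CLAIM (what is proved, stated in full; the proofs are below) =====
def Claim_equal_equivalence_class : Prop := ∀ (x : Int) (y : Int) (r : List Int) (s : List Int), Dom_equivalence_class x y r s → Pre_equivalence_class x y r s → Spec_equivalence_class x y r s (equivalence_class x y r s)

-- ===== LEMMAS AND PROOFS =====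

-- the grid as a flatMap, and basic vocabulary of the proof
def pvGridL (x y r0 r1 : Int) : List (Int × Int) :=
  (PySem.List.pyRange x r0 1).flatMap (fun i =>
    (PySem.List.pyRange y r1 1).map (fun j => (i, j)))

def pvBase (x y s0 s1 : Int) (p : Int × Int) : Int × Int :=
  (x + (p.1 - x) % s0, y + (p.2 - y) % s1)

def pvLex (p q : Int × Int) : Prop := p.1 < q.1 ∨ (p.1 = q.1 ∧ p.2 < q.2)

def pvBases (x y r0 r1 s0 s1 : Int) : List (Int × Int) :=
  (PySem.List.pyRange x (min r0 (x + s0)) 1).flatMap (fun a =>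
    (PySem.List.pyRange y (min r1 (y + s1)) 1).map (fun b => (a, b)))

theorem pvGrid_eq (x y r0 r1 : Int) : pvGrid x y r0 r1 = pvGridL x y r0 r1 := by
  unfold pvGrid pvGridL
  simp only [PySem.List.foldl_append_singleton_eq_map, PySem.List.foldl_append_eq_flatMap,
    List.nil_append]


theorem pvEmod_le (m s : Int) (hm : 0 ≤ m) (hs : 0 < s) : m % s ≤ m := by
  have h1 : m % s = m - s * (m / s) := Int.emod_def m s
  have h2 : 0 ≤ m / s := Int.ediv_nonneg hm (le_of_lt hs)
  nlinarith

theorem pvEq_of_pairwise_lt (l₁ : List Int) :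
    ∀ (l₂ : List Int), l₁.Pairwise (· < ·) → l₂.Pairwise (· < ·) →
      (∀ z, z ∈ l₁ ↔ z ∈ l₂) → l₁ = l₂ := by
  induction l₁ with
  | nil =>
    intro l₂ _ _ hm
    cases l₂ with
    | nil => rfl
    | cons b t => exact absurd ((hm b).2 (List.mem_cons_self)) (List.not_mem_nil)
  | cons a t ih =>
    intro l₂ h₁ h₂ hm
    cases l₂ with
    | nil => exact absurd ((hm a).1 (List.mem_cons_self)) (List.not_mem_nil)
    | cons b t₂ =>
      have hab : a = b := by
        have ha2 : a ∈ b :: t₂ := (hm a).1 List.mem_cons_self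
        have hb1 : b ∈ a :: t := (hm b).2 List.mem_cons_self
        rcases List.mem_cons.1 ha2 with h | h
        · exact h
        · rcases List.mem_cons.1 hb1 with h' | h'
          · exact h'.symm
          · have := (List.pairwise_cons.1 h₂).1 a h
            have := (List.pairwise_cons.1 h₁).1 b h'
            omega
      subst hab
      have ht : t = t₂ := by
        refine ih t₂ h₁.of_cons h₂.of_cons (fun z => ?_)
        constructor
        · intro hz
          have hz2 : z ∈ a :: t₂ := (hm z).1 (List.mem_cons_of_mem _ hz)
          rcases List.mem_cons.1 hz2 with h | h
          · have := (List.pairwise_cons.1 h₁).1 z hz; omega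
          · exact h
        · intro hz
          have hz1 : z ∈ a :: t := (hm z).2 (List.mem_cons_of_mem _ hz)
          rcases List.mem_cons.1 hz1 with h | h
          · have := (List.pairwise_cons.1 h₂).1 z hz; omega
          · exact h
      rw [ht]

theorem pvPairwise_lt_pyRange_pos (a b s : Int) (hs : 0 < s) :
    (PySem.List.pyRange a b s).Pairwise (· < ·) := by
  rw [PySem.List.pyRange_of_pos a b hs, List.pairwise_map]
  refine List.pairwise_lt_range.imp ?_
  intro k k' hk
  have : (k : Int) < (k' : Int) := by exact_mod_cast hk
  nlinarith

theorem pvMem_prod (l1 l2 : List Int) (p : Int × Int) :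
    p ∈ l1.flatMap (fun a => l2.map (fun b => (a, b))) ↔ p.1 ∈ l1 ∧ p.2 ∈ l2 := by
  cases p with
  | mk u v =>
    simp only [List.mem_flatMap, List.mem_map]
    constructor
    · rintro ⟨a, ha, b, hb, h⟩
      cases h; exact ⟨ha, hb⟩
    · rintro ⟨ha, hb⟩
      exact ⟨u, ha, v, hb, rfl⟩

theorem pvLex_pairwise_prod (l1 l2 : List Int) (h1 : l1.Pairwise (· < ·)) (h2 : l2.Pairwise (· < ·)) :
    (l1.flatMap (fun a => l2.map (fun b => (a, b)))).Pairwise pvLex := by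
  rw [List.pairwise_flatMap]
  constructor
  · intro a _
    rw [List.pairwise_map]
    exact h2.imp (fun h => Or.inr ⟨rfl, h⟩)
  · refine h1.imp_of_mem ?_
    intro a a' _ _ hlt
    intro p hp q hq
    rcases List.mem_map.1 hp with ⟨b, _, hb⟩
    rcases List.mem_map.1 hq with ⟨b', _, hb'⟩
    subst hb; subst hb'
    exact Or.inl hlt

theorem pvNodup_of_pairwise_lex (l : List (Int × Int)) (h : l.Pairwise pvLex) : l.Nodup := by
  refine h.imp ?_
  intro p q hpq
  rcases hpq with h | ⟨_, h⟩ <;> (intro he; subst he; omega)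

theorem pvGridL_pairwise (x y r0 r1 : Int) : (pvGridL x y r0 r1).Pairwise pvLex :=
  pvLex_pairwise_prod _ _ (PySem.List.pairwise_lt_pyRange_one _ _) (PySem.List.pairwise_lt_pyRange_one _ _)

theorem pvBases_pairwise (x y r0 r1 s0 s1 : Int) : (pvBases x y r0 r1 s0 s1).Pairwise pvLex :=
  pvLex_pairwise_prod _ _ (PySem.List.pairwise_lt_pyRange_one _ _) (PySem.List.pairwise_lt_pyRange_one _ _)

theorem pvMem_gridL (x y r0 r1 : Int) (p : Int × Int) :
    p ∈ pvGridL x y r0 r1 ↔ (x ≤ p.1 ∧ p.1 < r0) ∧ (y ≤ p.2 ∧ p.2 < r1) := by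
  rw [pvGridL, pvMem_prod, PySem.List.mem_pyRange_one, PySem.List.mem_pyRange_one]

theorem pvMem_bases (x y r0 r1 s0 s1 : Int) (p : Int × Int) :
    p ∈ pvBases x y r0 r1 s0 s1 ↔
      (x ≤ p.1 ∧ p.1 < min r0 (x + s0)) ∧ (y ≤ p.2 ∧ p.2 < min r1 (y + s1)) := by
  rw [pvBases, pvMem_prod, PySem.List.mem_pyRange_one, PySem.List.mem_pyRange_one]

-- the arithmetic of residues: over [lo, b) the elements congruent to a (with lo ≤ a < lo+s)
-- are exactly range(a, b, s)
theorem pvFilter_mod (s0 lo a b : Int) (hs : 0 < s0) (h1 : lo ≤ a) (h2 : a < lo + s0) :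
    (PySem.List.pyRange lo b 1).filter (fun i => decide (i % s0 = a % s0))
      = PySem.List.pyRange a b s0 := by
  refine pvEq_of_pairwise_lt _ _
    ((PySem.List.pairwise_lt_pyRange_one _ _).filter _)
    (pvPairwise_lt_pyRange_pos _ _ _ hs) ?_
  intro z
  rw [List.mem_filter, PySem.List.mem_pyRange_one, PySem.List.mem_pyRange_iff_of_pos hs,
    decide_eq_true_eq, Int.emod_eq_emod_iff_emod_sub_eq_zero, ← Int.dvd_iff_emod_eq_zero]
  constructor
  · rintro ⟨⟨hlo, hb⟩, hdvd⟩
    refine ⟨?_, hb, hdvd⟩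
    by_contra hza
    have h3 : 0 < a - z := by omega
    have h4 : s0 ∣ a - z := dvd_sub_comm.mp hdvd
    have := Int.le_of_dvd h3 h4
    omega
  · rintro ⟨haz, hb, hdvd⟩
    exact ⟨⟨by omega, hb⟩, hdvd⟩


theorem pvFlatMap_guard {b : Type} (l : List Int) (P : Int → Prop) [DecidablePred P] (g : Int → List b) :
    (l.flatMap (fun i => if P i then g i else [])) = (l.filter (fun i => decide (P i))).flatMap g := by
  induction l with
  | nil => rfl
  | cons a t ih => by_cases h : P a <;> simp [List.flatMap_cons, List.filter_cons, h, ih]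

theorem pvBase1_iff (x s0 a i : Int) (hs0 : 0 < s0) (hxa : x ≤ a) (has : a < x + s0) :
    (x + (i - x) % s0 = a) ↔ i % s0 = a % s0 := by
  have e1 : (a - x) % s0 = a - x := Int.emod_eq_of_lt (by omega) (by omega)
  have key : ∀ m k : Int, m - x - (k - x) = m - k := by intro m k; ring
  constructor
  · intro h
    rw [Int.emod_eq_emod_iff_emod_sub_eq_zero]
    have h2 : (i - x) % s0 = (a - x) % s0 := by omega
    have h3 := Int.emod_eq_emod_iff_emod_sub_eq_zero.mp h2
    rw [key] at h3
    exact h3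
  · intro h
    have h0 : (i - a) % s0 = 0 := Int.emod_eq_emod_iff_emod_sub_eq_zero.mp h
    have h2 : (i - x) % s0 = (a - x) % s0 := by
      rw [Int.emod_eq_emod_iff_emod_sub_eq_zero, key]; exact h0
    omega

theorem pvFilter_base (x y r0 r1 s0 s1 a b : Int) (hs0 : 0 < s0) (hs1 : 0 < s1)
    (hxa : x ≤ a) (has : a < x + s0) (hyb : y ≤ b) (hbs : b < y + s1) :
    (pvGridL x y r0 r1).filter (fun p => decide (pvBase x y s0 s1 p = (a, b)))
      = pvClass r0 r1 s0 s1 a b := by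
  rw [pvGridL, List.filter_flatMap]
  have hrow : ∀ i : Int,
      ((PySem.List.pyRange y r1 1).map (fun j => (i, j))).filter
          (fun p => decide (pvBase x y s0 s1 p = (a, b)))
        = if i % s0 = a % s0 then
            ((PySem.List.pyRange y r1 1).filter (fun j => decide (j % s1 = b % s1))).map
              (fun j => (i, j))
          else [] := by
    intro i
    rw [List.filter_map]
    by_cases hi : i % s0 = a % s0
    · rw [if_pos hi]
      congr 1
      apply List.filter_congr
      intro j _
      show decide (pvBase x y s0 s1 (i, j) = (a, b)) = decide (j % s1 = b % s1)
      apply Bool.decide_congr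
      show (x + (i - x) % s0, y + (j - y) % s1) = (a, b) ↔ _
      rw [Prod.mk.injEq]
      constructor
      · rintro ⟨_, h2⟩; exact (pvBase1_iff y s1 b j hs1 hyb hbs).mp h2
      · intro h2
        exact ⟨(pvBase1_iff x s0 a i hs0 hxa has).mpr hi,
               (pvBase1_iff y s1 b j hs1 hyb hbs).mpr h2⟩
    · rw [if_neg hi, List.map_eq_nil_iff, List.filter_eq_nil_iff]
      intro j _
      simp only [Function.comp, decide_eq_true_eq]
      show ¬ ((x + (i - x) % s0, y + (j - y) % s1) = (a, b))
      rw [Prod.mk.injEq]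
      rintro ⟨h1, _⟩
      exact hi ((pvBase1_iff x s0 a i hs0 hxa has).mp h1)
  calc ((PySem.List.pyRange x r0 1).flatMap fun i =>
          ((PySem.List.pyRange y r1 1).map (fun j => (i, j))).filter
            (fun p => decide (pvBase x y s0 s1 p = (a, b))))
      = ((PySem.List.pyRange x r0 1).flatMap fun i =>
          if i % s0 = a % s0 then
            ((PySem.List.pyRange y r1 1).filter (fun j => decide (j % s1 = b % s1))).map
              (fun j => (i, j))
          else []) := List.flatMap_congr (fun i _ => hrow i)
    _ = pvClass r0 r1 s0 s1 a b := by
        rw [pvFlatMap_guard, pvFilter_mod s0 x a r0 hs0 hxa has,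
          pvFilter_mod s1 y b r1 hs1 hyb hbs, pvClass]

theorem pvClass_nodup (r0 r1 s0 s1 a b : Int) (hs0 : 0 < s0) (hs1 : 0 < s1) :
    (pvClass r0 r1 s0 s1 a b).Nodup :=
  pvNodup_of_pairwise_lex _ (pvLex_pairwise_prod _ _
    (pvPairwise_lt_pyRange_pos _ _ _ hs0) (pvPairwise_lt_pyRange_pos _ _ _ hs1))

def pvStep (st : Option (List (Int × Int) × List (Int × Int))) (p : Int × Int) :
    Option (List (Int × Int) × List (Int × Int)) :=
  match st with
  | none => none
  | some (tmp, ali) =>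
    match PySem.List.remove? ali p with
    | none => none
    | some ali' => some (tmp ++ [p], ali')

theorem pvInner_eq_foldl (r0 r1 s0 s1 a b : Int) (L : List (Int × Int)) :
    pvInner r0 r1 s0 s1 a b L = (pvClass r0 r1 s0 s1 a b).foldl pvStep (some ([], L)) := by
  rw [pvInner, pvClass, List.foldl_flatMap]
  simp only [List.foldl_map]
  rfl

theorem pvFold_step (c : List (Int × Int)) :
    ∀ (L tmp0 : List (Int × Int)), c.Nodup → (∀ p ∈ c, p ∈ L) →
      c.foldl pvStep (some (tmp0, L)) =
        some (tmp0 ++ c, c.foldl (fun l p => l.erase p) L) := by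
  induction c with
  | nil => intro L tmp0 _ _; simp
  | cons q c' ih =>
    intro L tmp0 hnd hsub
    have hqL : q ∈ L := hsub q List.mem_cons_self
    have hqc' : q ∉ c' := (List.nodup_cons.mp hnd).1
    have hstep : pvStep (some (tmp0, L)) q = some (tmp0 ++ [q], L.erase q) := by
      simp [pvStep, PySem.List.remove?_eq_some_erase L q hqL]
    rw [List.foldl_cons, hstep,
      ih (L.erase q) (tmp0 ++ [q]) (List.nodup_cons.mp hnd).2 ?_]
    · simp
    · intro p hp
      exact (List.mem_erase_of_ne (fun he => hqc' (by rw [← he]; exact hp))).mpr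
        (hsub p (List.mem_cons_of_mem _ hp))

theorem pvEraseAll (c : List (Int × Int)) :
    ∀ (L : List (Int × Int)), L.Nodup →
      c.foldl (fun l p => l.erase p) L = L.filter (fun p => decide (p ∉ c)) := by
  induction c with
  | nil => intro L _; simp
  | cons q c' ih =>
    intro L hL
    rw [List.foldl_cons, ih (L.erase q) (hL.erase q), hL.erase_eq_filter q,
      List.filter_filter]
    apply List.filter_congr
    intro p _
    by_cases h1 : p = q <;> by_cases h2 : p ∈ c' <;> simp [h1, h2]

theorem pvHead_filter (l : List (Int × Int)) (p : (Int × Int) → Bool) (e : Int × Int) :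
    l.Pairwise pvLex → e ∈ l → p e = true → (∀ u ∈ l, p u = true → ¬ pvLex u e) →
    ∃ t, l.filter p = e :: t := by
  induction l with
  | nil => intro _ he _ _; exact absurd he List.not_mem_nil
  | cons hd tl ih =>
    intro hpw he hpe hmin
    by_cases hp : p hd = true
    · have hde : hd = e := by
        by_contra hne
        have he' : e ∈ tl := by
          rcases List.mem_cons.1 he with h | h
          · exact absurd h.symm hne
          · exact h
        exact hmin hd List.mem_cons_self hp ((List.pairwise_cons.1 hpw).1 e he')
      subst hde
      exact ⟨tl.filter p, by rw [List.filter_cons, if_pos hp]⟩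
    · have hne : e ≠ hd := fun h => hp (h ▸ hpe)
      have he' : e ∈ tl := by
        rcases List.mem_cons.1 he with h | h
        · exact absurd h hne
        · exact h
      rw [List.filter_cons, if_neg hp]
      exact ih hpw.of_cons he' hpe (fun u hu hpu => hmin u (List.mem_cons_of_mem _ hu) hpu)

theorem pvBase_le (x y s0 s1 : Int) (p : Int × Int) (hs0 : 0 < s0) (hs1 : 0 < s1)
    (hx : x ≤ p.1) (hy : y ≤ p.2) :
    (x ≤ (pvBase x y s0 s1 p).1 ∧ (pvBase x y s0 s1 p).1 ≤ p.1 ∧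
      (pvBase x y s0 s1 p).1 < x + s0) ∧
    (y ≤ (pvBase x y s0 s1 p).2 ∧ (pvBase x y s0 s1 p).2 ≤ p.2 ∧
      (pvBase x y s0 s1 p).2 < y + s1) := by
  rw [pvBase]
  have h1 := Int.emod_nonneg (p.1 - x) (ne_of_gt hs0)
  have h2 := Int.emod_lt_of_pos (p.1 - x) hs0
  have h3 := pvEmod_le (p.1 - x) s0 (by omega) hs0
  have h4 := Int.emod_nonneg (p.2 - y) (ne_of_gt hs1)
  have h5 := Int.emod_lt_of_pos (p.2 - y) hs1
  have h6 := pvEmod_le (p.2 - y) s1 (by omega) hs1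
  constructor <;> constructor <;> simp <;> omega

theorem pvLoop_nil (r0 r1 s0 s1 : Int) (fuel : Nat) (classes : List (List (Int × Int))) :
    pvLoop r0 r1 s0 s1 fuel [] classes = classes := by
  cases fuel <;> rfl

theorem pvLoop_succ_cons (r0 r1 s0 s1 : Int) (n : Nat) (x0 y0 : Int)
    (tl : List (Int × Int)) (classes : List (List (Int × Int))) :
    pvLoop r0 r1 s0 s1 (n + 1) ((x0, y0) :: tl) classes =
      match pvInner r0 r1 s0 s1 x0 y0 ((x0, y0) :: tl) with
      | none => classes
      | some (tmp, rest) => pvLoop r0 r1 s0 s1 n rest (classes ++ [tmp]) := rfl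

theorem pvLoop_inv (x y r0 r1 s0 s1 : Int) (hs0 : 0 < s0) (hs1 : 0 < s1) :
    ∀ (bs : List (Int × Int)), bs.Pairwise pvLex →
      (∀ p ∈ bs, (x ≤ p.1 ∧ p.1 < min r0 (x + s0)) ∧ (y ≤ p.2 ∧ p.2 < min r1 (y + s1))) →
      ∀ (fuel : Nat) (classes : List (List (Int × Int))),
        ((pvGridL x y r0 r1).filter (fun p => decide (pvBase x y s0 s1 p ∈ bs))).length ≤ fuel →
        pvLoop r0 r1 s0 s1 fuel
            ((pvGridL x y r0 r1).filter (fun p => decide (pvBase x y s0 s1 p ∈ bs))) classes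
          = classes ++ bs.map (fun p => pvClass r0 r1 s0 s1 p.1 p.2) := by
  intro bs
  induction bs with
  | nil =>
    intro _ _ fuel classes _
    simp [pvLoop_nil]
  | cons ab rest ih =>
    intro hpw hval fuel classes hfuel
    obtain ⟨a, b⟩ := ab
    obtain ⟨⟨hxa, hamin⟩, hyb, hbmin⟩ := hval (a, b) List.mem_cons_self
    have hbase_ab : pvBase x y s0 s1 (a, b) = (a, b) := by
      have e1 : (a - x) % s0 = a - x := Int.emod_eq_of_lt (by omega) (by omega)
      have e2 : (b - y) % s1 = b - y := Int.emod_eq_of_lt (by omega) (by omega)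
      rw [pvBase]
      simp only [e1, e2, Prod.mk.injEq]
      omega
    have habG : (a, b) ∈ pvGridL x y r0 r1 :=
      (pvMem_gridL x y r0 r1 (a, b)).2 ⟨⟨hxa, by omega⟩, hyb, by omega⟩
    have hPab : (fun p => decide (pvBase x y s0 s1 p ∈ (a, b) :: rest)) (a, b) = true := by
      simp [hbase_ab]
    have hmin : ∀ u ∈ pvGridL x y r0 r1,
        (fun p => decide (pvBase x y s0 s1 p ∈ (a, b) :: rest)) u = true → ¬ pvLex u (a, b) := by
      intro u huG hPu hlex
      obtain ⟨⟨hu1, hu2⟩, hu3, hu4⟩ := (pvMem_gridL x y r0 r1 u).1 huG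
      obtain ⟨⟨hb1, hb2, hb3⟩, hb4, hb5, hb6⟩ := pvBase_le x y s0 s1 u hs0 hs1 hu1 hu3
      have hblex : pvLex (pvBase x y s0 s1 u) (a, b) := by
        rcases hlex with h | ⟨h1, h2⟩ <;> unfold pvLex <;> simp at * <;> omega
      rw [decide_eq_true_eq] at hPu
      rcases List.mem_cons.1 hPu with h | h
      · rw [h] at hblex
        rcases hblex with h' | ⟨_, h'⟩ <;> simp at h' <;> omega
      · have := (List.pairwise_cons.1 hpw).1 _ h
        rcases hblex with h' | ⟨h1', h2'⟩ <;> rcases this with h'' | ⟨h1'', h2''⟩ <;> omega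
    obtain ⟨t, ht⟩ := pvHead_filter (pvGridL x y r0 r1) _ (a, b)
      (pvGridL_pairwise x y r0 r1) habG hPab hmin
    have hcfil : (pvGridL x y r0 r1).filter (fun p => decide (pvBase x y s0 s1 p = (a, b)))
        = pvClass r0 r1 s0 s1 a b :=
      pvFilter_base x y r0 r1 s0 s1 a b hs0 hs1 hxa (by omega) hyb (by omega)
    have hGnd : (pvGridL x y r0 r1).Nodup :=
      pvNodup_of_pairwise_lex _ (pvGridL_pairwise x y r0 r1)
    have hFnd : ((pvGridL x y r0 r1).filter
        (fun p => decide (pvBase x y s0 s1 p ∈ (a, b) :: rest))).Nodup := hGnd.filter _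
    have hcsub : ∀ p ∈ pvClass r0 r1 s0 s1 a b,
        p ∈ (pvGridL x y r0 r1).filter (fun p => decide (pvBase x y s0 s1 p ∈ (a, b) :: rest)) := by
      intro p hp
      rw [← hcfil] at hp
      obtain ⟨hpG, hpb⟩ := List.mem_filter.1 hp
      rw [decide_eq_true_eq] at hpb
      exact List.mem_filter.2 ⟨hpG, by rw [decide_eq_true_eq, hpb]; exact List.mem_cons_self⟩
    have hinner : pvInner r0 r1 s0 s1 a b
        ((pvGridL x y r0 r1).filter (fun p => decide (pvBase x y s0 s1 p ∈ (a, b) :: rest)))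
        = some (pvClass r0 r1 s0 s1 a b,
            ((pvGridL x y r0 r1).filter (fun p => decide (pvBase x y s0 s1 p ∈ (a, b) :: rest))).filter
              (fun p => decide (p ∉ pvClass r0 r1 s0 s1 a b))) := by
      rw [pvInner_eq_foldl,
        pvFold_step _ _ [] (pvClass_nodup r0 r1 s0 s1 a b hs0 hs1) hcsub,
        pvEraseAll _ _ hFnd, List.nil_append]
    have habnotin : (a, b) ∉ rest := by
      intro hmem
      have := (List.pairwise_cons.1 hpw).1 _ hmem
      rcases this with h | ⟨_, h⟩ <;> simp at h <;> omega
    have hnewfil : ((pvGridL x y r0 r1).filter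
          (fun p => decide (pvBase x y s0 s1 p ∈ (a, b) :: rest))).filter
            (fun p => decide (p ∉ pvClass r0 r1 s0 s1 a b))
        = (pvGridL x y r0 r1).filter (fun p => decide (pvBase x y s0 s1 p ∈ rest)) := by
      rw [List.filter_filter]
      apply List.filter_congr
      intro p hpG
      have hmemc : p ∈ pvClass r0 r1 s0 s1 a b ↔ pvBase x y s0 s1 p = (a, b) := by
        rw [← hcfil, List.mem_filter]
        simp [hpG]
      by_cases hb : pvBase x y s0 s1 p = (a, b)
      · simp [hb, hmemc, habnotin]
      · simp [List.mem_cons, hb, hmemc]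
    have habc : (a, b) ∈ pvClass r0 r1 s0 s1 a b := by
      rw [← hcfil]
      exact List.mem_filter.2 ⟨habG, by simp [hbase_ab]⟩
    have hlt : ((pvGridL x y r0 r1).filter (fun p => decide (pvBase x y s0 s1 p ∈ rest))).length
        < ((pvGridL x y r0 r1).filter
            (fun p => decide (pvBase x y s0 s1 p ∈ (a, b) :: rest))).length := by
      rw [← hnewfil]
      have hsub2 := List.filter_sublist
        (p := fun p => decide (p ∉ pvClass r0 r1 s0 s1 a b))
        (l := (pvGridL x y r0 r1).filter (fun p => decide (pvBase x y s0 s1 p ∈ (a, b) :: rest)))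
      have habF : (a, b) ∈ (pvGridL x y r0 r1).filter
          (fun p => decide (pvBase x y s0 s1 p ∈ (a, b) :: rest)) :=
        List.mem_filter.2 ⟨habG, hPab⟩
      have habnew : (a, b) ∉ ((pvGridL x y r0 r1).filter
          (fun p => decide (pvBase x y s0 s1 p ∈ (a, b) :: rest))).filter
            (fun p => decide (p ∉ pvClass r0 r1 s0 s1 a b)) := by
        intro hmem
        obtain ⟨_, hdec⟩ := List.mem_filter.1 hmem
        rw [decide_eq_true_eq] at hdec
        exact hdec habc
      have hle := hsub2.length_le
      rcases eq_or_lt_of_le hle with h | h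
      · exact absurd (hsub2.eq_of_length h) (fun he => habnew (by rw [he]; exact habF))
      · exact h
    cases fuel with
    | zero =>
      rw [ht] at hfuel
      simp at hfuel
    | succ n =>
      rw [ht, pvLoop_succ_cons, ← ht, hinner, hnewfil]
      dsimp only
      rw [ih hpw.of_cons (fun p hp => hval p (List.mem_cons_of_mem _ hp)) n (classes ++ [pvClass r0 r1 s0 s1 a b]) ?_]
      · simp
      · omega

theorem pvAlt_fold (x y r0 r1 s0 s1 : Int) :
    ((PySem.List.pyRange x (min r0 (x + s0)) 1).foldl (fun cls a =>
       (PySem.List.pyRange y (min r1 (y + s1)) 1).foldl (fun cls2 b =>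
         cls2 ++ [pvClass r0 r1 s0 s1 a b]) cls) [])
    = (pvBases x y r0 r1 s0 s1).map (fun p => pvClass r0 r1 s0 s1 p.1 p.2) := by
  simp only [PySem.List.foldl_append_singleton_eq_map, PySem.List.foldl_append_eq_flatMap,
    List.nil_append]
  rw [pvBases, List.map_flatMap]
  simp only [List.map_map]
  rfl

theorem pvGet0 (a : Int) (l : List Int) : PySem.List.pyGet? (a :: l) 0 = some a := by
  simp [PySem.List.pyGet?, PySem.List.pyIdx?]

theorem pvGet1 (a b : Int) (l : List Int) : PySem.List.pyGet? (a :: b :: l) 1 = some b := by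
  simp [PySem.List.pyGet?, PySem.List.pyIdx?]

theorem pvGetD0 (a : Int) (l : List Int) : PySem.List.pyGetD (a :: l) 0 0 = a := by
  simp [PySem.List.pyGetD, PySem.List.pyGet?, PySem.List.pyIdx?]

theorem pvGetD1 (a b : Int) (l : List Int) : PySem.List.pyGetD (a :: b :: l) 1 0 = b := by
  simp [PySem.List.pyGetD, PySem.List.pyGet?, PySem.List.pyIdx?]

theorem pvFilter_all (x y r0 r1 s0 s1 : Int) (hs0 : 0 < s0) (hs1 : 0 < s1) :
    (pvGridL x y r0 r1).filter
        (fun p => decide (pvBase x y s0 s1 p ∈ pvBases x y r0 r1 s0 s1)) = pvGridL x y r0 r1 := by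
  rw [List.filter_eq_self]
  intro p hp
  obtain ⟨⟨h1, h2⟩, h3, h4⟩ := (pvMem_gridL x y r0 r1 p).1 hp
  obtain ⟨⟨hb1, hb2, hb3⟩, hb4, hb5, hb6⟩ := pvBase_le x y s0 s1 p hs0 hs1 h1 h3
  rw [decide_eq_true_eq, pvMem_bases]
  constructor <;> constructor <;> omega

-- ===== VERDICT (by name: the statement is the Claim_ definition above) =====
theorem equivalence_class_spec : Claim_equal_equivalence_class := by
  intro x y r s _ hpre
  obtain ⟨hr1, hrest⟩ := hpre
  unfold Spec_equivalence_class
  rcases r with _ | ⟨r0v, _ | ⟨r1v, rt⟩⟩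
  · simp at hr1
  · have hnx : ¬ x < r0v := by
      intro hx
      have h2 := (hrest (by rw [pvGetD0]; exact hx)).1
      simp at h2
    simp [equivalence_class, equivalence_class_alt, pvGet0, hnx]
  · by_cases hx : x < r0v
    · have hr2 := (hrest (by rw [pvGetD0]; exact hx)).2
      by_cases hy : y < r1v
      · obtain ⟨hslen, hs0p, hs1p⟩ := hr2 (by rw [pvGetD1]; exact hy)
        rcases s with _ | ⟨s0v, _ | ⟨s1v, st⟩⟩
        · simp at hslen
        · simp at hslen
        · rw [pvGetD0] at hs0p
          rw [pvGetD1] at hs1p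
          have key := pvLoop_inv x y r0v r1v s0v s1v (by omega) (by omega)
            (pvBases x y r0v r1v s0v s1v) (pvBases_pairwise x y r0v r1v s0v s1v)
            (fun p hp => (pvMem_bases x y r0v r1v s0v s1v p).1 hp)
            (pvGridL x y r0v r1v).length []
          rw [pvFilter_all x y r0v r1v s0v s1v (by omega) (by omega)] at key
          have key2 := key (le_refl _)
          rw [List.nil_append] at key2
          simp only [equivalence_class, equivalence_class_alt, pvGet0, pvGet1,
            Option.elim_some, if_pos hx, if_pos hy, pvGrid_eq]
          rw [key2, pvAlt_fold]
      · have hg : pvGridL x y r0v r1v = [] := by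
          rw [pvGridL, PySem.List.pyRange_one_eq_nil (by omega : r1v ≤ y)]
          simp
        simp only [equivalence_class, equivalence_class_alt, pvGet0, pvGet1,
          Option.elim_some, if_pos hx, if_neg hy, pvGrid_eq, hg]
        cases PySem.List.pyGet? s 0 <;> cases PySem.List.pyGet? s 1 <;> simp [pvLoop_nil]
    · simp [equivalence_class, equivalence_class_alt, pvGet0, hx]
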